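-- pv_equiv track=rewrite | github.com/YeseulCho/KoreaBio | AdvancedPython/p067.py | mer
-- ===== SOURCE A (Python) =====
-- def mer(l_seq1, l_seq2, n) :
--     if n == 1 :
--         return l_seq2
--
--     else :
--
--         l_result = []
--
--         for i in l_seq1 :
--             for j in l_seq2 :
--                 l_result.append(i + j)
--
--         return mer(l_seq1, l_result, n-1)
-- ===== SOURCE B (Python) =====
-- def mer(l_seq1, l_seq2, n):
--     acc = l_seq2
--     while n != 1:
--         acc = [i + j for i in l_seq1 for j in acc]
--         n -= 1
--     return acc
-- ===== Notes on version B (the rewrite author's own statement) =====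
-- stated objective: idiomatic
-- what changed: The tail recursion with an explicit append-in-nested-loops product is replaced by an iterative while loop that rebuilds the accumulator with a single comprehension each round.
import Mathlib
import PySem

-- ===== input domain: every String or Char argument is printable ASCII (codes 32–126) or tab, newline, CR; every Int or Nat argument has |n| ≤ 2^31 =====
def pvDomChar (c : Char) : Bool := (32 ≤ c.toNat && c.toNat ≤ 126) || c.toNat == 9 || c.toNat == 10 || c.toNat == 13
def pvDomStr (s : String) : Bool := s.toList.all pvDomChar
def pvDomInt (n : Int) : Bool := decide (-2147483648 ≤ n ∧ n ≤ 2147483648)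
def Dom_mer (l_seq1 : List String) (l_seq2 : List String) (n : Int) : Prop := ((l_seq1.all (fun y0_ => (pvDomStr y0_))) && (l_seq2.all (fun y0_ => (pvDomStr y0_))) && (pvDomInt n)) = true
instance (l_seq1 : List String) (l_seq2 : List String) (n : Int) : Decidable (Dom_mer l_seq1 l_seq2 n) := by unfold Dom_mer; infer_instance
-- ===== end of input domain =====

-- B replaces A's tail recursion by an iterative while loop over a comprehension-built accumulator (idiomatic, same cost).


-- ===== PORT A =====
-- Recursion on n; the 'n < 1' guard only makes the definition total (Python recurses
-- until RecursionError there; such n are excluded by Pre_mer).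
def mer (l_seq1 : List String) (l_seq2 : List String) (n : Int) : List String :=
  if n = 1 then l_seq2
  else if n < 1 then []  -- unreachable under Pre_mer (Python raises RecursionError)
  else
    let l_result := l_seq1.foldl (fun r i => l_seq2.foldl (fun r j => r ++ [i ++ j]) r) []
    mer l_seq1 l_result (n - 1)
termination_by (n - 1).toNat
decreasing_by omega

-- ===== PORT B =====
-- the while loop runs exactly (n-1).toNat times for n ≥ 1 (for n < 1 Python loops forever;
-- excluded by Pre_mer); counted down here as a Nat recursion over the same accumulator
def merLoop (l_seq1 : List String) : Nat → List String → List String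
  | 0, acc => acc
  | k + 1, acc => merLoop l_seq1 k (l_seq1.flatMap (fun i => acc.map (fun j => i ++ j)))

def mer_alt (l_seq1 : List String) (l_seq2 : List String) (n : Int) : List String :=
  merLoop l_seq1 (n - 1).toNat l_seq2

-- ===== PRECONDITION & SPEC =====
-- Pre_ excludes n < 1, where Python A recurses without a base case and raises RecursionError.
def Pre_mer (l_seq1 : List String) (l_seq2 : List String) (n : Int) : Prop := 1 ≤ n
instance (l_seq1 : List String) (l_seq2 : List String) (n : Int) : Decidable (Pre_mer l_seq1 l_seq2 n) := by unfold Pre_mer; infer_instance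
def pvWitness_mer : List String × List String × Int := (["a", "b"], ["x", "y"], 3)

def Spec_mer (l_seq1 : List String) (l_seq2 : List String) (n : Int) (out : List String) : Prop := out = mer_alt l_seq1 l_seq2 n
instance (l_seq1 : List String) (l_seq2 : List String) (n : Int) (out : List String) : Decidable (Spec_mer l_seq1 l_seq2 n out) := by unfold Spec_mer; infer_instance

-- ===== CLAIM (what is proved, stated in full; the proofs are below) =====
def Claim_equal_mer : Prop := ∀ (l_seq1 : List String) (l_seq2 : List String) (n : Int), Dom_mer l_seq1 l_seq2 n → Pre_mer l_seq1 l_seq2 n → Spec_mer l_seq1 l_seq2 n (mer l_seq1 l_seq2 n)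

-- ===== LEMMAS AND PROOFS =====

theorem inner_foldl (i : String) (l2 : List String) (r : List String) :
    l2.foldl (fun r j => r ++ [i ++ j]) r = r ++ l2.map (fun j => i ++ j) := by
  induction l2 generalizing r with
  | nil => simp
  | cons x xs ih => simp [List.foldl, ih]

theorem outer_foldl (l1 l2 : List String) (r : List String) :
    l1.foldl (fun r i => l2.foldl (fun r j => r ++ [i ++ j]) r) r
      = r ++ l1.flatMap (fun i => l2.map (fun j => i ++ j)) := by
  induction l1 generalizing r with
  | nil => simp
  | cons x xs ih =>
    simp only [List.foldl]
    rw [inner_foldl, ih]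
    simp [List.flatMap]

theorem mer_eq_loop (l1 : List String) (k : Nat) :
    ∀ (n : Int) (l2 : List String), 1 ≤ n → (n - 1).toNat = k →
      mer l1 l2 n = merLoop l1 k l2 := by
  induction k with
  | zero =>
    intro n l2 hn hk
    have : n = 1 := by omega
    subst this
    simp [mer, merLoop]
  | succ k ih =>
    intro n l2 hn hk
    have hne : ¬ n = 1 := by omega
    have hge : ¬ n < 1 := by omega
    rw [mer]
    simp only [hne, hge, if_false]
    rw [outer_foldl]
    simp only [List.nil_append]
    rw [ih (n - 1) _ (by omega) (by omega)]
    rfl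

-- ===== VERDICT (by name: the statement is the Claim_ definition above) =====
theorem mer_spec : Claim_equal_mer := by
  intro l1 l2 n _ hpre
  unfold Spec_mer mer_alt
  exact mer_eq_loop l1 (n - 1).toNat n l2 hpre rfl
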